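-- pv_equiv track=rewrite | github.com/jamesfoxworth/ResumeGrill | parse.py | preprocess_tex
-- ===== SOURCE A (Python) =====
-- def preprocess_tex(lines):
--     """
--     Preprocess LaTeX lines to handle commands that span multiple lines.
--     Returns a new list of lines with multi-line commands combined.
--     """
--     result = []
--     i = 0
--     while i < len(lines):
--         line = lines[i].strip()
--         if not line or line.startswith('%'):
--             i += 1
--             continue
--         # If line starts with a command that may span multiple lines
--         if line.startswith('\\resumeSubheading') or line.startswith('\\resumeProjectHeading'):
--             combined = line
--             close_brace_count = line.count('}')
--             i += 1
--             # Keep adding lines until we've seen 4 closing braces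
--             while close_brace_count < 4 and i < len(lines):
--                 next_line = lines[i].strip()
--                 combined += ' ' + next_line
--                 close_brace_count += next_line.count('}')
--                 i += 1
--             result.append(combined)
--         else:
--             result.append(line)
--             i += 1
--     return result
-- ===== SOURCE B (Python) =====
-- def preprocess_tex(lines):
--     """Single flat pass with an accumulator state instead of a nested index loop."""
--     result = []
--     combined = None
--     brace_count = 0
--     for raw in lines:
--         line = raw.strip()
--         if combined is not None:
--             combined += ' ' + line
--             brace_count += line.count('}')
--             if brace_count >= 4:
--                 result.append(combined)
--                 combined = None
--         else:
--             if not line or line.startswith('%'):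
--                 continue
--             if line.startswith('\\resumeSubheading') or line.startswith('\\resumeProjectHeading'):
--                 brace_count = line.count('}')
--                 if brace_count >= 4:
--                     result.append(line)
--                 else:
--                     combined = line
--             else:
--                 result.append(line)
--     if combined is not None:
--         result.append(combined)
--     return result
-- ===== Notes on version B (the rewrite author's own statement) =====
-- stated objective: simpler
-- what changed: Replaced A's index-driven outer while-loop with a nested inner while-loop by one flat for-loop over the lines keeping an explicit state (pending accumulator + brace count), with a final flush.
import Mathlib
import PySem

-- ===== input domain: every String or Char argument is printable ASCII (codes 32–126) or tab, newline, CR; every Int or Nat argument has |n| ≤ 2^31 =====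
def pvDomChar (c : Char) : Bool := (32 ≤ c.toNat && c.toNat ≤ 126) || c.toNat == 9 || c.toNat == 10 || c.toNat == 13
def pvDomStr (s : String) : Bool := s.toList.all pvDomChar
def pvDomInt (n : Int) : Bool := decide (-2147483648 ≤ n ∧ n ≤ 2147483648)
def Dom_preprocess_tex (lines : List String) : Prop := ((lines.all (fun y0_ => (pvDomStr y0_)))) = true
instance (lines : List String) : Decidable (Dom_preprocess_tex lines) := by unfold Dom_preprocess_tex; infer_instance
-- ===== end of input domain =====

-- B replaces A's nested while-loops with one flat pass keeping an Option accumulator and a brace count (objective: simpler).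

-- ===== PORT A =====
-- A's inner while-loop: keep consuming stripped lines until 4 closing braces were seen or input ends.
def pvInnerA (cnt : Int) (combined : String) : List String → String × List String
  | [] => (combined, [])
  | x :: xs =>
    if cnt < 4 then
      let nl := PySem.Str.strip x
      pvInnerA (cnt + (PySem.Str.count nl "}" : Int)) (combined ++ " " ++ nl) xs
    else (combined, x :: xs)

-- needed by preprocess_tex's termination proof
theorem pvInnerA_len (cnt : Int) (c : String) (xs : List String) :
    (pvInnerA cnt c xs).2.length ≤ xs.length := by
  induction xs generalizing cnt c with
  | nil => simp [pvInnerA]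
  | cons x xs ih =>
    simp only [pvInnerA]
    split
    · exact le_trans (ih _ _) (Nat.le_succ _)
    · simp

def preprocess_tex (lines : List String) : List String :=
  match lines with
  | [] => []
  | l :: rest =>
    let line := PySem.Str.strip l
    if line == "" || PySem.Str.startswith line "%" then preprocess_tex rest
    else if PySem.Str.startswith line "\\resumeSubheading" ||
            PySem.Str.startswith line "\\resumeProjectHeading" then
      let p := pvInnerA (PySem.Str.count line "}" : Int) line rest
      p.1 :: preprocess_tex p.2
    else line :: preprocess_tex rest
termination_by lines.length
decreasing_by
  all_goals simp only [List.length_cons]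
  all_goals first
    | omega
    | (have := pvInnerA_len (PySem.Str.count (PySem.Str.strip l) "}" : Int) (PySem.Str.strip l) rest
       omega)

-- ===== PORT B =====
-- one step of B's flat loop: state = (result so far, pending accumulator, brace count)
def pvStepB (st : List String × Option String × Int) (raw : String) :
    List String × Option String × Int :=
  let line := PySem.Str.strip raw
  match st with
  | (res, some c, cnt) =>
    let c' := c ++ " " ++ line
    let cnt' := cnt + (PySem.Str.count line "}" : Int)
    if 4 ≤ cnt' then (res ++ [c'], none, cnt') else (res, some c', cnt')
  | (res, none, cnt) =>
    if line == "" || PySem.Str.startswith line "%" then (res, none, cnt)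
    else if PySem.Str.startswith line "\\resumeSubheading" ||
            PySem.Str.startswith line "\\resumeProjectHeading" then
      let cnt' := (PySem.Str.count line "}" : Int)
      if 4 ≤ cnt' then (res ++ [line], none, cnt') else (res, some line, cnt')
    else (res ++ [line], none, cnt)

def preprocess_tex_alt (lines : List String) : List String :=
  let st := lines.foldl pvStepB ([], none, 0)
  match st.2.1 with
  | some c => st.1 ++ [c]
  | none => st.1

-- ===== PRECONDITION & SPEC =====
def Spec_preprocess_tex (lines : List String) (out : List String) : Prop := out = preprocess_tex_alt lines
instance (lines : List String) (out : List String) : Decidable (Spec_preprocess_tex lines out) := by unfold Spec_preprocess_tex; infer_instance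

-- ===== CLAIM (what is proved, stated in full; the proofs are below) =====
def Claim_equal_preprocess_tex : Prop := ∀ (lines : List String), Dom_preprocess_tex lines → Spec_preprocess_tex lines (preprocess_tex lines)

-- ===== LEMMAS AND PROOFS =====
def pvFinish (st : List String × Option String × Int) : List String :=
  match st.2.1 with
  | some c => st.1 ++ [c]
  | none => st.1

theorem pvAlt_eq (lines : List String) :
    preprocess_tex_alt lines = pvFinish (lines.foldl pvStepB ([], none, 0)) := rfl

theorem pvInnerA_done (cnt : Int) (c : String) (xs : List String) (h : ¬ cnt < 4) :
    pvInnerA cnt c xs = (c, xs) := by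
  cases xs <;> simp [pvInnerA, h]

theorem pvMain (xs : List String) :
    (∀ res cnt, pvFinish (xs.foldl pvStepB (res, none, cnt)) = res ++ preprocess_tex xs) ∧
    (∀ res c cnt, cnt < 4 →
      pvFinish (xs.foldl pvStepB (res, some c, cnt)) =
        res ++ ((pvInnerA cnt c xs).1 :: preprocess_tex (pvInnerA cnt c xs).2)) := by
  induction xs with
  | nil =>
    constructor
    · intro res cnt; simp [pvFinish, preprocess_tex]
    · intro res c cnt h; simp [pvFinish, pvInnerA, preprocess_tex]
  | cons x xs ih =>
    obtain ⟨ihA, ihB⟩ := ih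
    constructor
    · intro res cnt
      rw [List.foldl_cons, preprocess_tex]
      simp only [pvStepB]
      by_cases h1 : (PySem.Str.strip x == "" || PySem.Str.startswith (PySem.Str.strip x) "%") = true
      · simp only [h1, if_true]
        exact ihA res cnt
      · rw [Bool.not_eq_true] at h1
        simp only [h1, Bool.false_eq_true, if_false]
        by_cases h2 : (PySem.Str.startswith (PySem.Str.strip x) "\\resumeSubheading" ||
            PySem.Str.startswith (PySem.Str.strip x) "\\resumeProjectHeading") = true
        · simp only [h2, if_true]
          by_cases h3 : 4 ≤ (PySem.Str.count (PySem.Str.strip x) "}" : Int)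
          · simp only [if_pos h3]
            rw [ihA, pvInnerA_done _ _ _ (by omega)]
            simp
          · simp only [if_neg h3]
            rw [ihB _ _ _ (by omega)]
        · rw [Bool.not_eq_true] at h2
          simp only [h2, Bool.false_eq_true, if_false]
          rw [ihA]
          simp
    · intro res c cnt h
      rw [List.foldl_cons]
      simp only [pvStepB]
      have hA : pvInnerA cnt c (x :: xs) =
          pvInnerA (cnt + (PySem.Str.count (PySem.Str.strip x) "}" : Int))
            (c ++ " " ++ PySem.Str.strip x) xs := by
        simp [pvInnerA, h]
      rw [hA]
      by_cases h3 : 4 ≤ cnt + (PySem.Str.count (PySem.Str.strip x) "}" : Int)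
      · simp only [if_pos h3]
        rw [ihA, pvInnerA_done _ _ _ (by omega)]
        simp
      · simp only [if_neg h3]
        exact ihB _ _ _ (by omega)

-- ===== VERDICT (by name: the statement is the Claim_ definition above) =====
theorem preprocess_tex_spec : Claim_equal_preprocess_tex := by
  intro lines _
  unfold Spec_preprocess_tex
  rw [pvAlt_eq, (pvMain lines).1 [] 0]
  simp
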